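-- pv_equiv track=rewrite | github.com/MrBrantCode/unitest_baseline | mut_generate/mist_train_taco/taco_2066/solution.py | count_distinct_pairs_with_difference
-- ===== SOURCE A (Python) =====
-- def count_distinct_pairs_with_difference(nums, k):
--     total = 0
--     d = set()
--     r = []
--
--     for n in nums:
--         if n - k in d:
--             r.append([n - k, n])
--             if k == 0:
--                 d.add(n)
--                 continue
--         if n + k in d:
--             r.append([n + k, n])
--         d.add(n)
--
--     di = dict()
--     for x in r:
--         sum_pair = x[0] + x[1]
--         if sum_pair not in di:
--             total += 1
--             di[sum_pair] = 1
--
--     return total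
-- ===== SOURCE B (Python) =====
-- def count_distinct_pairs_with_difference(nums, k):
--     s = set(nums)
--     if k == 0:
--         seen = set()
--         dup = set()
--         for n in nums:
--             if n in seen:
--                 dup.add(n)
--             else:
--                 seen.add(n)
--         return len(dup)
--     return sum(1 for a in s if a + k in s)
-- ===== Notes on version B (the rewrite author's own statement) =====
-- stated objective: simpler
-- what changed: A builds a list of matching pairs and then deduplicates their sums through a dict; B drops both passes and counts directly on set(nums): for k != 0 each value a with a+k also present gives the unique distinct sum 2a+k, and for k == 0 it counts the values occurring at least twice with a one-pass seen/dup scan.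
import Mathlib
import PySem

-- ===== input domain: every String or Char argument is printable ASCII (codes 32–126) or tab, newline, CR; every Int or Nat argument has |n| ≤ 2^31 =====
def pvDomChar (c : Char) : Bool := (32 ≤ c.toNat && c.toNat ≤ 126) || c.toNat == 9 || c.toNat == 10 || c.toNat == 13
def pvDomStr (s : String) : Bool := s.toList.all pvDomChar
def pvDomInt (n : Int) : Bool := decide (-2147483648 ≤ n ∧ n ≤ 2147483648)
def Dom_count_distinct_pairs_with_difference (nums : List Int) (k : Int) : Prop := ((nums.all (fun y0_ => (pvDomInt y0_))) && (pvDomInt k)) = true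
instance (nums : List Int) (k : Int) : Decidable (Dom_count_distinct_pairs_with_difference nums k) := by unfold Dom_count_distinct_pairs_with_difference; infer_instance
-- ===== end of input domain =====

-- B replaces A's pair-list + sum-dedup-dict with direct set-membership counting:
-- for k ≠ 0 each a with a+k also present yields the unique distinct sum 2a+k, so B counts those a;
-- for k = 0 B counts the values that occur at least twice (objective: simpler).

-- ===== PORT A =====
-- one iteration of A's first loop: state is (d, r)
def pvStepA (k : Int) (st : PySem.Set Int × List (Int × Int)) (n : Int) : PySem.Set Int × List (Int × Int) :=
  if PySem.Set.contains st.1 (n - k) then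
    if k == 0 then (PySem.Set.add st.1 n, st.2 ++ [(n - k, n)])
    else
      let r1 := st.2 ++ [(n - k, n)]
      let r2 := if PySem.Set.contains st.1 (n + k) then r1 ++ [(n + k, n)] else r1
      (PySem.Set.add st.1 n, r2)
  else
    let r2 := if PySem.Set.contains st.1 (n + k) then st.2 ++ [(n + k, n)] else st.2
    (PySem.Set.add st.1 n, r2)

-- one iteration of A's second loop: state is (total, di)
def pvStepA2 (st : Int × PySem.Dict Int Int) (x : Int × Int) : Int × PySem.Dict Int Int :=
  if (PySem.Dict.get? st.2 (x.1 + x.2)).isNone then (st.1 + 1, PySem.Dict.insert st.2 (x.1 + x.2) 1)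
  else st

def count_distinct_pairs_with_difference (nums : List Int) (k : Int) : Int :=
  let st := nums.foldl (pvStepA k) (PySem.Set.empty, [])
  let st2 := st.2.foldl pvStepA2 (0, PySem.Dict.empty)
  st2.1

-- ===== PORT B =====
-- one iteration of B's k == 0 scan: state is (seen, dup)
def pvStepB (st : PySem.Set Int × PySem.Set Int) (n : Int) : PySem.Set Int × PySem.Set Int :=
  if PySem.Set.contains st.1 n then (st.1, PySem.Set.add st.2 n)
  else (PySem.Set.add st.1 n, st.2)

def count_distinct_pairs_with_difference_alt (nums : List Int) (k : Int) : Int :=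
  let s := PySem.Set.ofList nums
  if k == 0 then
    let st := nums.foldl pvStepB (PySem.Set.empty, PySem.Set.empty)
    PySem.Set.len st.2
  else
    ((s.filter (fun a => PySem.Set.contains s (a + k))).length : Int)

-- ===== PRECONDITION & SPEC =====
def Spec_count_distinct_pairs_with_difference (nums : List Int) (k : Int) (out : Int) : Prop := out = count_distinct_pairs_with_difference_alt nums k
instance (nums : List Int) (k : Int) (out : Int) : Decidable (Spec_count_distinct_pairs_with_difference nums k out) := by unfold Spec_count_distinct_pairs_with_difference; infer_instance

-- ===== CLAIM (what is proved, stated in full; the proofs are below) =====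
def Claim_equal_count_distinct_pairs_with_difference : Prop := ∀ (nums : List Int) (k : Int), Dom_count_distinct_pairs_with_difference nums k → Spec_count_distinct_pairs_with_difference nums k (count_distinct_pairs_with_difference nums k)

-- ===== LEMMAS AND PROOFS =====

-- the list of pair-sums of A's list r
def pvSums (r : List (Int × Int)) : List Int := r.map (fun p => p.1 + p.2)

lemma pvSums_append (r s : List (Int × Int)) : pvSums (r ++ s) = pvSums r ++ pvSums s := by
  simp [pvSums]

-- the set of sums A's first loop adds while consuming l from prior-seen set d, for k ≠ 0
def pvQA (k : Int) (d : PySem.Set Int) (l : List Int) (z : Int) : Prop :=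
  ∃ a, z = 2 * a + k ∧ (a ∈ d ∨ a ∈ l) ∧ (a + k ∈ d ∨ a + k ∈ l) ∧ (a ∈ l ∨ a + k ∈ l)

-- the same for k = 0
def pvQZ (d : PySem.Set Int) (l : List Int) (z : Int) : Prop :=
  ∃ a, z = a + a ∧ ((a ∈ d ∧ a ∈ l) ∨ 2 ≤ l.count a)

lemma card_sdiff_ins (x : Int) (T K : Finset Int) (hx : x ∉ K) :
    ((insert x T) \ K).card = (T \ insert x K).card + 1 := by
  have h1 : insert x T \ K = insert x (T \ K) := by
    ext y; by_cases hyx : y = x <;> simp [hyx, hx]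
  have h2 : T \ insert x K = (T \ K).erase x := by
    ext y; simp [Finset.mem_erase]; tauto
  rw [h1, h2]
  by_cases hxt : x ∈ T \ K
  · rw [Finset.insert_eq_self.mpr hxt, Finset.card_erase_of_mem hxt]
    have := Finset.card_pos.mpr ⟨x, hxt⟩; omega
  · rw [Finset.card_insert_of_notMem hxt, Finset.erase_eq_of_notMem hxt]

-- A's second loop counts the distinct sums
lemma pvLoop2 (r : List (Int × Int)) : ∀ (t : Int) (di : PySem.Dict Int Int), di.keys.Nodup →
    (r.foldl pvStepA2 (t, di)).1 = t + (((pvSums r).toFinset \ di.keys.toFinset).card : Int) := by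
  induction r with
  | nil => intro t di h; simp [pvSums]
  | cons p r ih =>
    intro t di h
    rw [List.foldl_cons]
    by_cases hc : di.get? (p.1 + p.2) = none
    · have hmem : p.1 + p.2 ∉ di.keys := (PySem.Dict.get?_eq_none_iff_not_mem_keys di _).mp hc
      have hcont : di.contains (p.1 + p.2) = false := by
        rw [PySem.Dict.contains_eq_isSome_get?, hc]; rfl
      have hkeys : (di.insert (p.1 + p.2) 1).keys = di.keys ++ [p.1 + p.2] :=
        PySem.Dict.keys_insert_of_not_contains di 1 hcont
      have hnd : (di.insert (p.1 + p.2) 1).keys.Nodup := by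
        exact PySem.Dict.nodup_keys_insert di _ 1 h
      have hstep : pvStepA2 (t, di) p = (t + 1, di.insert (p.1 + p.2) 1) := by
        simp [pvStepA2, hc]
      rw [hstep, ih (t+1) _ hnd, hkeys]
      have : (di.keys ++ [p.1 + p.2]).toFinset = insert (p.1 + p.2) di.keys.toFinset := by
        simp [List.toFinset_append]
      rw [this]
      have hsum : (pvSums (p :: r)).toFinset = insert (p.1 + p.2) (pvSums r).toFinset := by
        simp [pvSums]
      rw [hsum, card_sdiff_ins _ _ _ (by simpa using hmem)]
      push_cast; ring
    · have hmem : p.1 + p.2 ∈ di.keys := by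
        by_contra hmm
        exact hc ((PySem.Dict.get?_eq_none_iff_not_mem_keys di _).mpr hmm)
      have hstep : pvStepA2 (t, di) p = (t, di) := by
        simp [pvStepA2, Option.isNone_iff_eq_none, hc]
      rw [hstep, ih t di h]
      have hsum : (pvSums (p :: r)).toFinset = insert (p.1 + p.2) (pvSums r).toFinset := by
        simp [pvSums]
      rw [hsum, Finset.insert_sdiff_of_mem _ (by simpa using hmem)]

-- key step for the first-loop invariant, k ≠ 0
lemma pvQA_step (k : Int) (hk : k ≠ 0) (d : PySem.Set Int) (n : Int) (l : List Int) (z : Int) :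
    pvQA k d (n :: l) z ↔
      ((n - k ∈ d ∧ z = 2 * n - k) ∨ (n + k ∈ d ∧ z = 2 * n + k) ∨ pvQA k (PySem.Set.add d n) l z) := by
  unfold pvQA
  simp only [List.mem_cons, PySem.Set.mem_add]
  constructor
  · rintro ⟨a, hz, h1, h2, h3⟩
    by_cases ha : a ∈ l
    · right; right; exact ⟨a, hz, by tauto, by tauto, Or.inl ha⟩
    by_cases hak : a + k ∈ l
    · right; right; exact ⟨a, hz, by tauto, by tauto, Or.inr hak⟩
    · -- a ∉ l, a+k ∉ l : so a = n or a + k = n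
      rcases h3 with (h3 | h3) <;> rcases h3 with h3 | h3 <;> try contradiction
      · -- a = n
        subst h3
        have : a + k ∈ d := by rcases h2 with h2 | h2 | h2 <;> [exact h2; omega; exact absurd h2 hak]
        right; left; exact ⟨this, by omega⟩
      · -- a + k = n
        have hd : a ∈ d := by rcases h1 with h1 | h1 | h1 <;> [exact h1; omega; exact absurd h1 ha]
        left; constructor
        · have : n - k = a := by omega
          rw [this]; exact hd
        · omega
  · rintro (⟨hd, hz⟩ | ⟨hd, hz⟩ | ⟨a, hz, h1, h2, h3⟩)
    · exact ⟨n - k, by omega, Or.inl hd, by right; left; omega, by right; left; omega⟩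
    · exact ⟨n, by omega, by tauto, Or.inl hd, by tauto⟩
    · exact ⟨a, hz, by tauto, by tauto, by tauto⟩

-- A's first loop characterised, k ≠ 0
lemma pvLoopA (k : Int) (hk : k ≠ 0) (l : List Int) :
    ∀ (d : PySem.Set Int) (r : List (Int × Int)) (z : Int),
      z ∈ pvSums (l.foldl (pvStepA k) (d, r)).2 ↔ z ∈ pvSums r ∨ pvQA k d l z := by
  induction l with
  | nil => intro d r z; simp [pvQA]
  | cons n l ih =>
    intro d r z
    rw [List.foldl_cons]
    have hk0 : (k == 0) = false := by simp [hk]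
    have e1 : n - k + n = 2 * n - k := by ring
    have e2 : n + k + n = 2 * n + k := by ring
    rw [pvQA_step k hk d n l z]
    by_cases h1 : n - k ∈ d <;> by_cases h2 : n + k ∈ d
    · have e : pvStepA k (d, r) n = (PySem.Set.add d n, (r ++ [(n - k, n)]) ++ [(n + k, n)]) := by
        simp [pvStepA, hk0, h1, h2]
      rw [e, ih, pvSums_append, pvSums_append]
      simp only [pvSums, List.map_cons, List.map_nil, List.mem_append, List.mem_singleton, e1, e2]
      tauto
    · have e : pvStepA k (d, r) n = (PySem.Set.add d n, r ++ [(n - k, n)]) := by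
        simp [pvStepA, hk0, h1, h2]
      rw [e, ih, pvSums_append]
      simp only [pvSums, List.map_cons, List.map_nil, List.mem_append, List.mem_singleton, e1]
      tauto
    · have e : pvStepA k (d, r) n = (PySem.Set.add d n, r ++ [(n + k, n)]) := by
        simp [pvStepA, h1, h2]
      rw [e, ih, pvSums_append]
      simp only [pvSums, List.map_cons, List.map_nil, List.mem_append, List.mem_singleton, e2]
      tauto
    · have e : pvStepA k (d, r) n = (PySem.Set.add d n, r) := by
        simp [pvStepA, h1, h2]
      rw [e, ih]
      tauto

-- key step for the first-loop invariant, k = 0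
lemma pvQZ_step (d : PySem.Set Int) (n : Int) (l : List Int) (z : Int) :
    pvQZ d (n :: l) z ↔ ((n ∈ d ∧ z = n + n) ∨ pvQZ (PySem.Set.add d n) l z) := by
  unfold pvQZ
  constructor
  · rintro ⟨a, hz, ⟨had, hal⟩ | hc⟩
    · rcases List.mem_cons.mp hal with h | h
      · subst h; exact Or.inl ⟨had, hz⟩
      · exact Or.inr ⟨a, hz, Or.inl ⟨(PySem.Set.mem_add _ _ _).mpr (Or.inl had), h⟩⟩
    · by_cases han : a = n
      · subst han
        have hself := List.count_cons_self (a := a) (l := l)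
        exact Or.inr ⟨a, hz, Or.inl ⟨(PySem.Set.mem_add _ _ _).mpr (Or.inr rfl), List.count_pos_iff.mp (by omega)⟩⟩
      · have hne := List.count_cons_of_ne (Ne.symm han) (l := l)
        exact Or.inr ⟨a, hz, Or.inr (by omega)⟩
  · rintro (⟨hd, hz⟩ | ⟨a, hz, ⟨had, hal⟩ | hc⟩)
    · exact ⟨n, hz, Or.inl ⟨hd, List.mem_cons_self⟩⟩
    · rcases (PySem.Set.mem_add _ _ _).mp had with h | h
      · exact ⟨a, hz, Or.inl ⟨h, List.mem_cons_of_mem n hal⟩⟩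
      · subst h
        refine ⟨a, hz, Or.inr ?_⟩
        have h1 : 1 ≤ l.count a := List.count_pos_iff.mpr hal
        have hself := List.count_cons_self (a := a) (l := l); omega
    · refine ⟨a, hz, Or.inr ?_⟩
      by_cases han : a = n
      · subst han; have hself := List.count_cons_self (a := a) (l := l); omega
      · have hne := List.count_cons_of_ne (Ne.symm han) (l := l); omega

-- A's first loop characterised, k = 0
lemma pvLoopZ (l : List Int) :
    ∀ (d : PySem.Set Int) (r : List (Int × Int)) (z : Int),
      z ∈ pvSums (l.foldl (pvStepA 0) (d, r)).2 ↔ z ∈ pvSums r ∨ pvQZ d l z := by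
  induction l with
  | nil => intro d r z; simp [pvQZ]
  | cons n l ih =>
    intro d r z
    rw [List.foldl_cons, pvQZ_step d n l z]
    by_cases h1 : n ∈ d
    · have e : pvStepA 0 (d, r) n = (PySem.Set.add d n, r ++ [(n, n)]) := by
        simp [pvStepA, h1]
      rw [e, ih, pvSums_append]
      simp only [pvSums, List.map_cons, List.map_nil, List.mem_append, List.mem_singleton]
      tauto
    · have e : pvStepA 0 (d, r) n = (PySem.Set.add d n, r) := by
        simp [pvStepA, h1]
      rw [e, ih]
      tauto

-- B's k = 0 scan: dup is nodup and holds exactly the values occurring at least twice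
lemma pvLoopB (l : List Int) :
    ∀ (seen dup : PySem.Set Int), dup.Nodup →
      (l.foldl pvStepB (seen, dup)).2.Nodup ∧
      (∀ x, x ∈ (l.foldl pvStepB (seen, dup)).2 ↔ x ∈ dup ∨ (x ∈ seen ∧ x ∈ l) ∨ 2 ≤ l.count x) := by
  induction l with
  | nil => intro seen dup h; simpa using h
  | cons n l ih =>
    intro seen dup h
    rw [List.foldl_cons]
    by_cases h1 : n ∈ seen
    · have e : pvStepB (seen, dup) n = (seen, PySem.Set.add dup n) := by
        simp [pvStepB, h1]
      rw [e]
      obtain ⟨hnd, hmem⟩ := ih seen (PySem.Set.add dup n) (PySem.Set.nodup_add dup n h)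
      refine ⟨hnd, fun x => ?_⟩
      rw [hmem x, PySem.Set.mem_add]
      by_cases hxn : x = n
      · subst hxn
        constructor
        · rintro (h | h | h)
          · tauto
          · exact Or.inr (Or.inl ⟨h1, List.mem_cons_self⟩)
          · have := List.count_cons_self (a := x) (l := l); right; right; omega
        · rintro (h | h | h)
          · tauto
          · tauto
          · by_cases hxl : x ∈ l
            · exact Or.inr (Or.inl ⟨h1, hxl⟩)
            · have : l.count x = 0 := List.count_eq_zero.mpr hxl
              have := List.count_cons_self (a := x) (l := l); omega
      · rw [List.count_cons_of_ne (fun hh => hxn hh.symm)]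
        constructor
        · rintro (h | h | h) <;> tauto
        · rintro (h | h | h) <;> try tauto
          rcases List.mem_cons.mp h.2 with hh | hh
          · exact absurd hh hxn
          · tauto
    · have e : pvStepB (seen, dup) n = (PySem.Set.add seen n, dup) := by
        simp [pvStepB, h1]
      rw [e]
      obtain ⟨hnd, hmem⟩ := ih (PySem.Set.add seen n) dup h
      refine ⟨hnd, fun x => ?_⟩
      rw [hmem x, PySem.Set.mem_add]
      by_cases hxn : x = n
      · subst hxn
        constructor
        · rintro (h | h | h)
          · tauto
          · rcases h.1 with hh | hh
            · exact absurd hh h1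
            · have h2 := List.count_pos_iff.mpr h.2
              have := List.count_cons_self (a := x) (l := l); right; right; omega
          · have := List.count_cons_self (a := x) (l := l); right; right; omega
        · rintro (h | h | h)
          · tauto
          · exact absurd h.1 h1
          · have := List.count_cons_self (a := x) (l := l)
            have h2 : 1 ≤ l.count x := by omega
            exact Or.inr (Or.inl ⟨Or.inr rfl, List.count_pos_iff.mp (by omega)⟩)
      · rw [List.count_cons_of_ne (fun hh => hxn hh.symm)]
        constructor
        · rintro (h | h | h) <;> tauto
        · rintro (h | h | h) <;> try tauto
          rcases List.mem_cons.mp h.2 with hh | hh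
          · exact absurd hh hxn
          · exact Or.inr (Or.inl ⟨Or.inl h.1, hh⟩)

-- the two ports agree on every input
lemma pvMain (nums : List Int) (k : Int) :
    count_distinct_pairs_with_difference nums k = count_distinct_pairs_with_difference_alt nums k := by
  unfold count_distinct_pairs_with_difference count_distinct_pairs_with_difference_alt
  have hA : (((nums.foldl (pvStepA k) (PySem.Set.empty, [])).2.foldl pvStepA2 (0, PySem.Dict.empty)).1)
      = ((pvSums (nums.foldl (pvStepA k) (PySem.Set.empty, [])).2).toFinset.card : Int) := by
    rw [pvLoop2 _ 0 PySem.Dict.empty (by simp [PySem.Dict.keys_empty])]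
    simp
  by_cases hk : k = 0
  · subst hk
    simp only [beq_self_eq_true, if_true]
    rw [hA]
    set dup := (nums.foldl pvStepB (PySem.Set.empty, PySem.Set.empty)).2 with hdup
    obtain ⟨hnd, hmem⟩ := pvLoopB nums PySem.Set.empty PySem.Set.empty (by simp [PySem.Set.empty])
    have himg : (pvSums (nums.foldl (pvStepA 0) (PySem.Set.empty, [])).2).toFinset
        = dup.toFinset.image (fun a => a + a) := by
      ext z
      rw [List.mem_toFinset, pvLoopZ nums PySem.Set.empty [] z]
      simp only [Finset.mem_image, List.mem_toFinset]
      constructor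
      · rintro (h | h)
        · simp [pvSums] at h
        · obtain ⟨a, hz, h⟩ := h
          refine ⟨a, ?_, hz.symm⟩
          rw [hmem a]
          rcases h with ⟨h, _⟩ | h
          · simp [PySem.Set.empty] at h
          · tauto
      · rintro ⟨a, ha, hz⟩
        rw [hmem a] at ha
        right
        refine ⟨a, hz.symm, Or.inr ?_⟩
        rcases ha with h | h | h
        · simp [PySem.Set.empty] at h
        · simp [PySem.Set.empty] at h
        · exact h
    rw [himg, Finset.card_image_of_injective _ (fun a b h => by omega),
        List.toFinset_card_of_nodup hnd]
    simp [PySem.Set.len]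
    rfl
  · have hkb : (k == 0) = false := by simp [hk]
    simp only [hkb]
    rw [hA]
    set T := (PySem.Set.ofList nums).filter (fun a => PySem.Set.contains (PySem.Set.ofList nums) (a + k)) with hT
    have hTmem : ∀ a, a ∈ T ↔ a ∈ nums ∧ a + k ∈ nums := by
      intro a
      rw [hT, List.mem_filter]
      rw [PySem.Set.contains_iff, PySem.Set.mem_ofList, PySem.Set.mem_ofList]
    have hTnd : T.Nodup := List.Nodup.filter _ (PySem.Set.nodup_ofList nums)
    have himg : (pvSums (nums.foldl (pvStepA k) (PySem.Set.empty, [])).2).toFinset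
        = T.toFinset.image (fun a => 2 * a + k) := by
      ext z
      rw [List.mem_toFinset, pvLoopA k hk nums PySem.Set.empty [] z]
      simp only [Finset.mem_image, List.mem_toFinset]
      constructor
      · rintro (h | h)
        · simp [pvSums] at h
        · obtain ⟨a, hz, h1, h2, h3⟩ := h
          refine ⟨a, (hTmem a).mpr ⟨?_, ?_⟩, hz.symm⟩
          · rcases h1 with h | h
            · simp [PySem.Set.empty] at h
            · exact h
          · rcases h2 with h | h
            · simp [PySem.Set.empty] at h
            · exact h
      · rintro ⟨a, ha, hz⟩
        rw [hTmem a] at ha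
        exact Or.inr ⟨a, hz.symm, Or.inr ha.1, Or.inr ha.2, Or.inl ha.1⟩
    rw [himg, Finset.card_image_of_injective _ (fun a b h => by omega),
        List.toFinset_card_of_nodup hTnd]
    simp

-- ===== VERDICT (by name: the statement is the Claim_ definition above) =====
theorem count_distinct_pairs_with_difference_spec : Claim_equal_count_distinct_pairs_with_difference := by
  intro nums k _
  exact pvMain nums k
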